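-- pv_equiv track=rewrite | github.com/luizaugustoliveira/Algoritmos | Laço - For/numeros_oscilantes/numeros.py | saida
-- ===== SOURCE A (Python) =====
-- def saida(seq):
--     retorno = False
--     if len(seq) >= 2:
--         for i in range(len(seq)):
--             if i != len(seq) - 1:
--                 if int(seq[i]) % 2 == 0 and int(seq[i + 1]) % 2 == 1:
--                     retorno = True
--
--         for i in range(len(seq)):
--             if i != len(seq) - 1:
--                 if int(seq[i]) % 2 == 1 and int(seq[i + 1]) % 2 == 0:
--                     retorno = True
--
--         for i in range(len(seq)):
--             if i != len(seq) - 1: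
--                 if int(seq[i]) % 2 == 0 and int(seq[i + 1]) % 2 == 0:
--                     retorno = False
--
--                 if int(seq[i]) % 2 == 1 and int(seq[i + 1]) % 2 == 1:
--                     retorno = False
--
--     return retorno
-- ===== SOURCE B (Python) =====
-- def saida(seq):
--     if len(seq) < 2:
--         return False
--     return all(int(a) % 2 != int(b) % 2 for a, b in zip(seq, seq[1:]))
-- ===== Notes on version B (the rewrite author's own statement) =====
-- stated objective: simpler
-- what changed: Replaces A's three full index-loop passes with mutable flag-setting by one short-circuiting scan over adjacent pairs (zip) that checks parity alternation directly.
import Mathlib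
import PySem

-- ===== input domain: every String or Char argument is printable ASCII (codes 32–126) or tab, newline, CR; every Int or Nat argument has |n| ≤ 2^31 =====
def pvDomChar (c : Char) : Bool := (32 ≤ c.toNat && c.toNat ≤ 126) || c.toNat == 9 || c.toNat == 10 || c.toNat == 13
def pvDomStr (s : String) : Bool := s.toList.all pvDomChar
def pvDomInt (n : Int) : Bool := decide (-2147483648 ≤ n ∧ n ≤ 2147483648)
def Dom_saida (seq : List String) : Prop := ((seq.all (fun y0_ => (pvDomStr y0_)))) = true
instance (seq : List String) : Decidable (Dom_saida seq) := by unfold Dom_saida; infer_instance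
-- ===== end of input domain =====

-- B replaces A's three full flag-setting index passes by a single short-circuiting
-- all() scan over adjacent pairs (zip): simpler, one pass.


-- ===== PORT A =====
-- int(s), total form: exact wherever Pre_saida guarantees parsing succeeds
def pvInt (s : String) : Int := (PySem.Int.ofStr? s).getD 0

def saida (seq : List String) : Bool :=
  let retorno := false
  if 2 ≤ seq.length then
    let n : Int := seq.length
    let r1 := (PySem.List.pyRange 0 n 1).foldl (fun r i =>
      if i ≠ n - 1 then
        if (PySem.Int.mod (pvInt (PySem.List.pyGetD seq i "")) 2 == 0 &&
            PySem.Int.mod (pvInt (PySem.List.pyGetD seq (i+1) "")) 2 == 1) then true else r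
      else r) retorno
    let r2 := (PySem.List.pyRange 0 n 1).foldl (fun r i =>
      if i ≠ n - 1 then
        if (PySem.Int.mod (pvInt (PySem.List.pyGetD seq i "")) 2 == 1 &&
            PySem.Int.mod (pvInt (PySem.List.pyGetD seq (i+1) "")) 2 == 0) then true else r
      else r) r1
    let r3 := (PySem.List.pyRange 0 n 1).foldl (fun r i =>
      if i ≠ n - 1 then
        let r' := if (PySem.Int.mod (pvInt (PySem.List.pyGetD seq i "")) 2 == 0 &&
                      PySem.Int.mod (pvInt (PySem.List.pyGetD seq (i+1) "")) 2 == 0) then false else r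
        if (PySem.Int.mod (pvInt (PySem.List.pyGetD seq i "")) 2 == 1 &&
            PySem.Int.mod (pvInt (PySem.List.pyGetD seq (i+1) "")) 2 == 1) then false else r'
      else r) r2
    r3
  else retorno

-- ===== PORT B =====
def saida_alt (seq : List String) : Bool :=
  if seq.length < 2 then false
  else (seq.zip (PySem.List.slice seq (some 1) none)).all
    (fun p => PySem.Int.mod (pvInt p.1) 2 != PySem.Int.mod (pvInt p.2) 2)

-- ===== PRECONDITION & SPEC =====
-- Pre_ excludes exactly the inputs where A raises ValueError: length ≥ 2 with an
-- element int() cannot parse.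
def Pre_saida (seq : List String) : Prop :=
  seq.length < 2 ∨ ∀ s ∈ seq, (PySem.Int.ofStr? s).isSome = true
instance (seq : List String) : Decidable (Pre_saida seq) := by unfold Pre_saida; infer_instance

def pvWitness_saida : List String := ["2", "3", "4"]

def Spec_saida (seq : List String) (out : Bool) : Prop := out = saida_alt seq
instance (seq : List String) (out : Bool) : Decidable (Spec_saida seq out) := by unfold Spec_saida; infer_instance

-- ===== CLAIM (what is proved, stated in full; the proofs are below) =====
def Claim_equal_saida : Prop := ∀ (seq : List String), Dom_saida seq → Pre_saida seq → Spec_saida seq (saida seq)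

-- ===== LEMMAS AND PROOFS =====

-- a flag-setting pass that only writes `true`
theorem foldl_sets_true (l : List Int) (m : Int) (c : Int → Bool) (r0 : Bool) :
    l.foldl (fun r i => if i ≠ m then (if c i then true else r) else r) r0
      = (r0 || l.any (fun i => decide (i ≠ m) && c i)) := by
  induction l generalizing r0 with
  | nil => simp
  | cons a t ih =>
    simp only [List.foldl_cons, List.any_cons, ih]
    by_cases h : a = m
    · simp [h]
    · cases hc : c a <;> simp [h]

-- a flag-setting pass that only writes `false` (two sequential ifs)
theorem foldl_sets_false (l : List Int) (m : Int) (c1 c2 : Int → Bool) (r0 : Bool) :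
    l.foldl (fun r i => if i ≠ m then
        (if c2 i then false else (if c1 i then false else r)) else r) r0
      = (!(l.any (fun i => decide (i ≠ m) && (c1 i || c2 i))) && r0) := by
  induction l generalizing r0 with
  | nil => simp
  | cons a t ih =>
    simp only [List.foldl_cons, List.any_cons, ih]
    by_cases h : a = m
    · simp [h]
    · cases h1 : c1 a <;> cases h2 : c2 a <;> simp [h]

-- 'any index i < n-1 with g seq[i] seq[i+1]' = 'any adjacent pair (a,b) with g a b'
theorem any_range_pairs (seq : List String) (g : String → String → Bool) :
    (PySem.List.pyRange 0 (seq.length : Int) 1).any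
      (fun i => decide (i ≠ (seq.length : Int) - 1) &&
        g (PySem.List.pyGetD seq i "") (PySem.List.pyGetD seq (i+1) ""))
      = (seq.zip seq.tail).any (fun p => g p.1 p.2) := by
  rw [Bool.eq_iff_iff]
  simp only [List.any_eq_true, PySem.List.mem_pyRange_one, Bool.and_eq_true, decide_eq_true_eq]
  constructor
  · rintro ⟨i, ⟨h0, hn⟩, hne, hg⟩
    have hlt : i < (seq.length : Int) - 1 := lt_of_le_of_ne (by omega) hne
    have hk : i.toNat + 1 < seq.length := by omega
    have e1 : PySem.List.pyGetD seq i "" = seq[i.toNat] :=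
      PySem.List.pyGetD_eq_getElem (xs := seq) (i := i) (d := "") h0 (by omega)
    have e2 : PySem.List.pyGetD seq (i+1) "" = seq[i.toNat + 1] := by
      have h := PySem.List.pyGetD_eq_getElem (xs := seq) (i := i+1) (d := "")
        (by omega) (by omega)
      rw [h]
      congr 1
      omega
    refine ⟨(seq[i.toNat], seq[i.toNat + 1]), ?_, ?_⟩
    · have hz : i.toNat < (seq.zip seq.tail).length := by
        simp only [List.length_zip, List.length_tail]; omega
      have hget : (seq.zip seq.tail)[i.toNat] = (seq[i.toNat], seq[i.toNat + 1]) := by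
        simp [List.getElem_zip, List.getElem_tail]
      exact hget ▸ List.getElem_mem hz
    · rw [e1, e2] at hg
      exact hg
  · rintro ⟨p, hp, hg⟩
    obtain ⟨k, hk, hpk⟩ := List.mem_iff_getElem.mp hp
    have hk' : k + 1 < seq.length := by
      have := hk; simp only [List.length_zip, List.length_tail] at this; omega
    refine ⟨(k : Int), ⟨by omega, by omega⟩, by omega, ?_⟩
    have hz : (seq.zip seq.tail)[k] = (seq[k]'(by omega), seq[k+1]'(by omega)) := by
      simp [List.getElem_zip, List.getElem_tail]
    rw [hz] at hpk
    have e1 : PySem.List.pyGetD seq (k : Int) "" = seq[k]'(by omega) := by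
      rw [PySem.List.pyGetD_eq_getElem (xs := seq) (i := (k : Int)) (d := "")
        (by omega) (by omega)]
      simp
    have e2 : PySem.List.pyGetD seq ((k : Int)+1) "" = seq[k+1]'(by omega) := by
      rw [PySem.List.pyGetD_eq_getElem (xs := seq) (i := (k : Int) + 1) (d := "")
        (by omega) (by omega)]
      simp
    rw [e1, e2]

    subst hpk
    simpa using hg

theorem mod2_cases (a : Int) : PySem.Int.mod a 2 = 0 ∨ PySem.Int.mod a 2 = 1 := by
  have h0 := PySem.Int.mod_nonneg a (b := 2) (by omega)
  have h1 := PySem.Int.mod_lt a (b := 2) (by omega)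
  omega

-- ===== VERDICT (by name: the statement is the Claim_ definition above) =====
theorem saida_spec : Claim_equal_saida := by
  intro seq _ _
  unfold Spec_saida saida saida_alt
  by_cases h2 : 2 ≤ seq.length
  · simp only [h2, if_true, Nat.not_lt.mpr h2]
    rw [PySem.List.slice_from_one]
    rw [foldl_sets_true, foldl_sets_true, foldl_sets_false]
    rw [any_range_pairs seq (fun a b => PySem.Int.mod (pvInt a) 2 == 0 && PySem.Int.mod (pvInt b) 2 == 1)]
    rw [any_range_pairs seq (fun a b => PySem.Int.mod (pvInt a) 2 == 1 && PySem.Int.mod (pvInt b) 2 == 0)]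
    rw [any_range_pairs seq (fun a b =>
      (PySem.Int.mod (pvInt a) 2 == 0 && PySem.Int.mod (pvInt b) 2 == 0) ||
      (PySem.Int.mod (pvInt a) 2 == 1 && PySem.Int.mod (pvInt b) 2 == 1))]
    rw [if_neg (by exact fun h => h.elim)]
    have hfun1 : (fun (p : String × String) =>
        (PySem.Int.mod (pvInt p.1) 2 == 0 && PySem.Int.mod (pvInt p.2) 2 == 0 ||
         PySem.Int.mod (pvInt p.1) 2 == 1 && PySem.Int.mod (pvInt p.2) 2 == 1))
        = (fun (p : String × String) =>
            PySem.Int.mod (pvInt p.1) 2 == PySem.Int.mod (pvInt p.2) 2) := by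
      funext p
      rcases mod2_cases (pvInt p.1) with h1 | h1 <;>
        rcases mod2_cases (pvInt p.2) with hb | hb <;> rw [h1, hb] <;> rfl
    have hall : ((seq.zip seq.tail).all fun p =>
        PySem.Int.mod (pvInt p.1) 2 != PySem.Int.mod (pvInt p.2) 2)
        = (!((seq.zip seq.tail).any fun p =>
            PySem.Int.mod (pvInt p.1) 2 == PySem.Int.mod (pvInt p.2) 2)) := by
      rw [List.all_eq_not_any_not]
      simp only [bne, Bool.not_not]
    rw [hfun1, hall, Bool.false_or]
    cases hS : ((seq.zip seq.tail).any fun p =>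
        PySem.Int.mod (pvInt p.1) 2 == PySem.Int.mod (pvInt p.2) 2) with
    | true => rfl
    | false =>
      obtain ⟨a, b, t, rfl⟩ : ∃ a b t, seq = a :: b :: t := by
        match seq, h2 with
        | a :: b :: t, _ => exact ⟨a, b, t, rfl⟩
      simp only [List.tail_cons, List.zip_cons_cons, List.any_cons,
        Bool.or_eq_false_iff] at hS
      have hne : PySem.Int.mod (pvInt a) 2 ≠ PySem.Int.mod (pvInt b) 2 := by
        have := hS.1
        simpa using this
      simp only [List.tail_cons, List.zip_cons_cons, List.any_cons, Bool.not_false,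
        Bool.true_and]
      rcases mod2_cases (pvInt a) with h1 | h1 <;>
        rcases mod2_cases (pvInt b) with hb | hb
      · exact absurd (h1.trans hb.symm) hne
      · rw [h1, hb]; simp
      · rw [h1, hb]; simp
      · exact absurd (h1.trans hb.symm) hne
  · simp [h2, (by omega : seq.length < 2)]
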